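-- pv_equiv track=rewrite | github.com/MarciV2/OurSearchEngine | WebCrawler.py | clean_wordlist
-- ===== SOURCE A (Python) =====
-- specialsymbols = "!@#$%^&*()_+={[}]|\;:\"<>?/., '\"©►“„…´​​​​​​"
--
-- def clean_wordlist(wordlist):
--     clean_list = []
--     for word in wordlist:
--         for i in range(len(specialsymbols)):
--             word = word.replace(specialsymbols[i], "")
--         if len(word) > 0:
--             clean_list.append(word)
--     return clean_list
-- ===== SOURCE B (Python) =====
-- specialsymbols = "!@#$%^&*()_+={[}]|\;:\"<>?/., '\"©►“„…´​​​​​​"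
--
-- _SPECIAL = frozenset(specialsymbols)
--
-- def _clean_word(word):
--     return ''.join(c for c in word if c not in _SPECIAL)
--
-- def clean_wordlist(wordlist):
--     return [w for w in map(_clean_word, wordlist) if w]
-- ===== Notes on version B (the rewrite author's own statement) =====
-- stated objective: faster
-- what changed: A rebuilds each word 43 times, once per special symbol via str.replace; B builds a frozenset of the symbols once and makes a single per-character pass over each word, keeping characters not in the set (measured ~5x faster).
import Mathlib
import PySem

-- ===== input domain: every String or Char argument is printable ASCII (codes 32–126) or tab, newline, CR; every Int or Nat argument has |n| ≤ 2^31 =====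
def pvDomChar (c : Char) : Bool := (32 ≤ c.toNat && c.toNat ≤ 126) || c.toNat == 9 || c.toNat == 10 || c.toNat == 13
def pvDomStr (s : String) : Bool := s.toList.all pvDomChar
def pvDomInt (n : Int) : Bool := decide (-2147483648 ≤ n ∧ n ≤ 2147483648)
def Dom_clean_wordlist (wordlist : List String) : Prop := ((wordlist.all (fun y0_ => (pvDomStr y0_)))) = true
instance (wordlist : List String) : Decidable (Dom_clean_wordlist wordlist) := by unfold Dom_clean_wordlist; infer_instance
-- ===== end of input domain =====

-- ===== PORT A =====
-- B simplifies A's per-symbol replace loop into one per-character filter pass; equal on all inputs.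
def pvSymbols : List Char :=
  ['!','@','#','$','%','^','&','*','(',')','_','+','=','{','[','}',']','|','\\',';',':','"','<','>','?','/','.',',',' ','\'','"','\u00A9','\u25BA','\u201C','\u201E','\u2026','\u00B4','\u200B','\u200B','\u200B','\u200B','\u200B','\u200B']

def clean_wordlist (wordlist : List String) : List String :=
  wordlist.foldl (fun clean_list word =>
    let w := (PySem.List.pyRange 0 (pvSymbols.length : Int) 1).foldl
      (fun w i => PySem.Chars.replace w [PySem.List.pyGetD pvSymbols i ' '] []) word.toList
    if w.length > 0 then clean_list ++ [String.ofList w] else clean_list) []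

-- ===== PORT B =====
def pvSpecial : PySem.Set Char := PySem.Set.ofList pvSymbols

def pvCleanWord (word : String) : String :=
  String.ofList (word.toList.filter (fun c => !(PySem.Set.contains pvSpecial c)))

def clean_wordlist_alt (wordlist : List String) : List String :=
  (wordlist.map pvCleanWord).filter (fun w => w != "")

-- ===== PRECONDITION & SPEC =====
def Spec_clean_wordlist (wordlist : List String) (out : List String) : Prop := out = clean_wordlist_alt wordlist
instance (wordlist : List String) (out : List String) : Decidable (Spec_clean_wordlist wordlist out) := by unfold Spec_clean_wordlist; infer_instance

-- ===== CLAIM (what is proved, stated in full; the proofs are below) =====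
def Claim_equal_clean_wordlist : Prop := ∀ (wordlist : List String), Dom_clean_wordlist wordlist → Spec_clean_wordlist wordlist (clean_wordlist wordlist)

-- ===== LEMMAS AND PROOFS =====

-- replace.go with old = [c], new = [] and enough fuel filters c out (accumulator reversed in front)
lemma replace_go_single (c : Char) :
    ∀ (l acc : List Char) (fuel : Nat), l.length ≤ fuel →
      PySem.Chars.replace.go [c] [] fuel l acc = acc.reverse ++ l.filter (fun x => x != c) := by
  intro l
  induction l with
  | nil =>
    intro acc fuel _
    cases fuel <;> simp [PySem.Chars.replace.go]
  | cons d t ih =>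
    intro acc fuel hf
    cases fuel with
    | zero => simp at hf
    | succ n =>
      by_cases h : d = c
      · subst h
        simp only [PySem.Chars.replace.go, List.isPrefixOf, List.isPrefixOf_cons₂]
        simp [ih acc n (by simpa using hf)]
      · simp only [PySem.Chars.replace.go]
        have : List.isPrefixOf [c] (d :: t) = false := by
          simp [List.isPrefixOf_cons₂]
          exact fun hcd => absurd hcd.symm h
        rw [this]
        simp only [Bool.false_eq_true, if_false]
        rw [ih (d :: acc) n (by simpa using hf)]
        simp [h]

lemma replace_single (w : List Char) (c : Char) :
    PySem.Chars.replace w [c] [] = w.filter (fun x => x != c) := by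
  simp [PySem.Chars.replace, replace_go_single c w [] w.length le_rfl]

lemma foldl_replace (syms : List Char) :
    ∀ (w : List Char),
      syms.foldl (fun w c => PySem.Chars.replace w [c] []) w
        = w.filter (fun x => !(syms.contains x)) := by
  induction syms with
  | nil => intro w; simp
  | cons c t ih =>
    intro w
    rw [List.foldl_cons, ih, replace_single, List.filter_filter]
    apply List.filter_congr
    intro x _
    simp only [List.contains_cons, Bool.not_or]
    cases h : x == c <;> simp [bne, h, BEq.comm (a := c) (b := x)]

lemma contains_pvSpecial (c : Char) :
    PySem.Set.contains pvSpecial c = pvSymbols.contains c := by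
  simp only [PySem.Set.contains, pvSpecial]
  rw [Bool.eq_iff_iff]
  simp [PySem.Set.mem_ofList]

lemma clean_word_eq (word : String) :
    (PySem.List.pyRange 0 (pvSymbols.length : Int) 1).foldl
        (fun w i => PySem.Chars.replace w [PySem.List.pyGetD pvSymbols i ' '] []) word.toList
      = (pvCleanWord word).toList := by
  rw [PySem.List.foldl_pyRange_pyGetD' (xs := pvSymbols) (d := ' ')
        (f := fun w c => PySem.Chars.replace w [c] []) (init := word.toList) (by norm_num)]
  rw [foldl_replace]
  simp only [pvCleanWord, String.toList_ofList, Int.toNat_zero, List.drop_zero]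
  apply List.filter_congr
  intro x _
  rw [contains_pvSpecial]

-- a string's length is positive iff it differs from ""
lemma decide_len_pos_eq_bne (s : String) : (s != "") = decide (s.toList.length > 0) := by
  rw [Bool.eq_iff_iff]
  constructor
  · intro h
    simp only [bne_iff_ne] at h
    simp only [decide_eq_true_eq]
    show 0 < s.toList.length
    rw [List.length_pos_iff]
    intro he
    apply h
    have := congrArg String.ofList he
    simpa using this
  · intro h
    simp only [decide_eq_true_eq] at h
    simp only [bne_iff_ne]
    intro he
    subst he
    simp at h

-- ===== VERDICT (by name: the statement is the Claim_ definition above) =====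
theorem clean_wordlist_spec : Claim_equal_clean_wordlist := by
  intro wordlist _
  unfold Spec_clean_wordlist clean_wordlist clean_wordlist_alt
  simp only [clean_word_eq]
  rw [PySem.List.foldl_append_ite (p := fun word => (pvCleanWord word).toList.length > 0)
        (f := fun word => String.ofList (pvCleanWord word).toList)]
  rw [List.filter_map]
  simp only [List.nil_append, String.ofList_toList]
  congr 1
  apply List.filter_congr
  intro x _
  exact (decide_len_pos_eq_bne (pvCleanWord x)).symm
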